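-- pv_equiv track=rewrite | github.com/itzbl4ck/PLC-2025 | projeto/code/analiseSemantica.py | calculaTamanhoArray
-- ===== SOURCE A (Python) =====
-- def calculaTamanhoArray(dimensoes):
--     tamanho_total = 1
--     for inicio, fim in dimensoes:
--         if inicio < 0 or fim < 0:
--             raise TamanhoArrayNegativoError(inicio, fim)
--         if fim < inicio:
--             raise TamanhoArrayInvalidoError(inicio, fim)
--         tamanho_total *= (fim - inicio + 1)
--     return tamanho_total
-- ===== SOURCE B (Python) =====
-- class TamanhoArrayNegativoError(Exception):
--     def __init__(self, inicio, fim):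
--         super().__init__(inicio, fim)
--
-- class TamanhoArrayInvalidoError(Exception):
--     def __init__(self, inicio, fim):
--         super().__init__(inicio, fim)
--
-- def calculaTamanhoArray(dimensoes):
--     # Balanced divide-and-conquer over index ranges: the size of dimensoes[lo:hi]
--     # is the product of the sizes of its two halves; each pair is validated at
--     # the leaf that consumes it.
--     def tam(lo, hi):
--         if hi - lo == 0:
--             return 1
--         if hi - lo == 1:
--             inicio, fim = dimensoes[lo]
--             if inicio < 0 or fim < 0:
--                 raise TamanhoArrayNegativoError(inicio, fim)
--             if fim < inicio:
--                 raise TamanhoArrayInvalidoError(inicio, fim)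
--             return fim - inicio + 1
--         mid = (lo + hi) // 2
--         return tam(lo, mid) * tam(mid, hi)
--     return tam(0, len(dimensoes))
-- ===== Notes on version B (the rewrite author's own statement) =====
-- stated objective: alternative
-- what changed: B computes the size by balanced divide-and-conquer recursion on index ranges, validating each pair at the leaf that consumes it, instead of A's single left-to-right accumulator loop over the pairs.
import Mathlib
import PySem

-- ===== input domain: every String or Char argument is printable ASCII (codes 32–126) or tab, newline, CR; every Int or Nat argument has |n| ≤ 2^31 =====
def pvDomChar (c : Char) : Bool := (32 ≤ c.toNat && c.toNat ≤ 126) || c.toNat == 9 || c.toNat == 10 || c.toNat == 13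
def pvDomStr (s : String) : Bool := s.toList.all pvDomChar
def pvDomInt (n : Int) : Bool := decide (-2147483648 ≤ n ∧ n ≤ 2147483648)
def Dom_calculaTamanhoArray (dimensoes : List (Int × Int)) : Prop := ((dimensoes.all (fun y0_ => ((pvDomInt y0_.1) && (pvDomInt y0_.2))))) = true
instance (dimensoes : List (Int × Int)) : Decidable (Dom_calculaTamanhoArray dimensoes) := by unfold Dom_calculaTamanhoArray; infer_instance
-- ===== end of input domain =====

-- B replaces A's single left-to-right accumulator loop by a balanced
-- divide-and-conquer recursion on index ranges (validation at the leaves); objective: alternative.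


-- ===== PORT A =====
-- A's single loop: accumulator tamanho_total; a raise is ported as none.
def pvALoop (t : Int) : List (Int × Int) → Option Int
  | [] => some t
  | (inicio, fim) :: rest =>
    if inicio < 0 || fim < 0 then none
    else if fim < inicio then none
    else pvALoop (t * (fim - inicio + 1)) rest

def calculaTamanhoArray (dimensoes : List (Int × Int)) : Int :=
  (pvALoop 1 dimensoes).getD 0

-- ===== PORT B =====
-- B's inner tam(lo, hi): balanced divide-and-conquer on the index range;
-- a raise at a leaf is ported as none (dimensoes[lo] is always in range here,
-- so list indexing is ported with getD).
def pvBTam (d : List (Int × Int)) (lo hi : Nat) : Option Int :=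
  if hi - lo = 0 then some 1
  else if hi - lo = 1 then
    let p := d.getD lo (0, 0)
    if p.1 < 0 || p.2 < 0 then none
    else if p.2 < p.1 then none
    else some (p.2 - p.1 + 1)
  else
    let mid := (lo + hi) / 2
    match pvBTam d lo mid, pvBTam d mid hi with
    | some a, some b => some (a * b)
    | _, _ => none
termination_by hi - lo
decreasing_by all_goals omega

def calculaTamanhoArray_alt (dimensoes : List (Int × Int)) : Int :=
  (pvBTam dimensoes 0 dimensoes.length).getD 0

-- ===== PRECONDITION & SPEC =====
-- Pre_ excludes exactly the inputs on which Python A raises (a negative bound or fim < inicio).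
def Pre_calculaTamanhoArray (dimensoes : List (Int × Int)) : Prop :=
  ∀ p ∈ dimensoes, 0 ≤ p.1 ∧ p.1 ≤ p.2
instance (dimensoes : List (Int × Int)) : Decidable (Pre_calculaTamanhoArray dimensoes) := by
  unfold Pre_calculaTamanhoArray; infer_instance

def pvWitness_calculaTamanhoArray : (List (Int × Int)) := [(1, 3), (0, 0), (2, 5)]

def Spec_calculaTamanhoArray (dimensoes : List (Int × Int)) (out : Int) : Prop := out = calculaTamanhoArray_alt dimensoes
instance (dimensoes : List (Int × Int)) (out : Int) : Decidable (Spec_calculaTamanhoArray dimensoes out) := by unfold Spec_calculaTamanhoArray; infer_instance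

-- ===== CLAIM (what is proved, stated in full; the proofs are below) =====
def Claim_equal_calculaTamanhoArray : Prop := ∀ (dimensoes : List (Int × Int)), Dom_calculaTamanhoArray dimensoes → Pre_calculaTamanhoArray dimensoes → Spec_calculaTamanhoArray dimensoes (calculaTamanhoArray dimensoes)

-- ===== LEMMAS AND PROOFS =====
-- The product of the range sizes of the segment d[lo:hi].
def pvSegProd (d : List (Int × Int)) (lo hi : Nat) : Int :=
  (((d.drop lo).take (hi - lo)).map (fun p => p.2 - p.1 + 1)).prod

theorem pvALoop_ok (dimensoes : List (Int × Int)) :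
    ∀ t : Int, Pre_calculaTamanhoArray dimensoes →
      pvALoop t dimensoes = some (t * (dimensoes.map (fun p => p.2 - p.1 + 1)).prod) := by
  induction dimensoes with
  | nil => intro t _; simp [pvALoop]
  | cons hd tl ih =>
    intro t hpre
    obtain ⟨h1, h2⟩ := hpre hd (List.mem_cons_self ..)
    have hrest : Pre_calculaTamanhoArray tl := fun p hp => hpre p (List.mem_cons_of_mem _ hp)
    obtain ⟨i, f⟩ := hd
    simp only [pvALoop]
    rw [if_neg (by simp; omega), if_neg (by simp at h2 ⊢; omega), ih _ hrest]
    simp [mul_assoc]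

theorem pvSegProd_split (d : List (Int × Int)) (lo mid hi : Nat)
    (h1 : lo ≤ mid) (h2 : mid ≤ hi) :
    pvSegProd d lo hi = pvSegProd d lo mid * pvSegProd d mid hi := by
  unfold pvSegProd
  have hsum : hi - lo = (mid - lo) + (hi - mid) := by omega
  rw [hsum, List.take_add, List.map_append, List.prod_append, List.drop_drop]
  have hm : lo + (mid - lo) = mid := by omega
  rw [hm]

theorem pvBTam_ok (d : List (Int × Int)) (hpre : Pre_calculaTamanhoArray d) :
    ∀ n lo hi, hi - lo = n → hi ≤ d.length →
      pvBTam d lo hi = some (pvSegProd d lo hi) := by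
  intro n
  induction n using Nat.strong_induction_on with
  | _ n ih =>
    intro lo hi hn hle
    by_cases h0 : hi - lo = 0
    · rw [pvBTam]
      simp [h0, pvSegProd]
    · by_cases h1 : hi - lo = 1
      · have hlt : lo < d.length := by omega
        have hmem : d[lo] ∈ d := List.getElem_mem hlt
        obtain ⟨hp1, hp2⟩ := hpre _ hmem
        have hget : d.getD lo (0, 0) = d[lo] := List.getD_eq_getElem d (0,0) hlt
        rw [pvBTam, if_neg h0, if_pos h1]
        simp only [hget]
        rw [if_neg (by simp; omega), if_neg (by simp; omega)]
        have hdrop : d.drop lo = d[lo] :: d.drop (lo + 1) :=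
          List.drop_eq_getElem_cons hlt
        unfold pvSegProd
        rw [h1, hdrop]
        show _ = some ((List.map _ [d[lo]]).prod)
        simp
      · have h2 : 2 ≤ hi - lo := by omega
        rw [pvBTam, if_neg h0, if_neg h1]
        have hmidl : lo ≤ (lo + hi) / 2 := by omega
        have hmidr : (lo + hi) / 2 ≤ hi := by omega
        show (match pvBTam d lo ((lo + hi) / 2), pvBTam d ((lo + hi) / 2) hi with
              | some a, some b => some (a * b)
              | _, _ => none) = some (pvSegProd d lo hi)
        rw [ih ((lo + hi) / 2 - lo) (by omega) lo _ rfl (by omega),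
            ih (hi - (lo + hi) / 2) (by omega) _ hi rfl hle]
        simp [pvSegProd_split d lo ((lo + hi) / 2) hi hmidl hmidr]

-- ===== VERDICT (by name: the statement is the Claim_ definition above) =====
theorem calculaTamanhoArray_spec : Claim_equal_calculaTamanhoArray := by
  intro dimensoes _ hpre
  unfold Spec_calculaTamanhoArray calculaTamanhoArray calculaTamanhoArray_alt
  rw [pvALoop_ok dimensoes 1 hpre,
      pvBTam_ok dimensoes hpre (dimensoes.length - 0) 0 dimensoes.length rfl (Nat.le_refl _)]
  simp [pvSegProd]
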